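-- pv_equiv track=rewrite | github.com/pedropva/AIprojects | sources/Data.py | isAValidMAtrix
-- ===== SOURCE A (Python) =====
-- def isAValidMAtrix(matrix):
--     maxN = len(matrix) * len(matrix[0])
--     minN = 0
--     numbers= []
--     for l in matrix:
--         for r in l:
--             if r > maxN or r < minN:
--                 return False
--             if r not in numbers:
--                 numbers.append(r)
--             else:
--                 return False
--     return True
-- ===== SOURCE B (Python) =====
-- def isAValidMAtrix(matrix):
--     maxN = len(matrix) * len(matrix[0])
--     flat = sorted(r for l in matrix for r in l)
--     if flat and (flat[0] < 0 or flat[-1] > maxN):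
--         return False
--     return all(a < b for a, b in zip(flat, flat[1:]))
-- ===== Notes on version B (the rewrite author's own statement) =====
-- stated objective: alternative
-- what changed: Sort-then-scan instead of per-element membership in a growing list: sorts the flattened values, checks the range only at the sorted list's two ends, and decides distinctness by one adjacent strict-inequality scan.
import Mathlib
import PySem

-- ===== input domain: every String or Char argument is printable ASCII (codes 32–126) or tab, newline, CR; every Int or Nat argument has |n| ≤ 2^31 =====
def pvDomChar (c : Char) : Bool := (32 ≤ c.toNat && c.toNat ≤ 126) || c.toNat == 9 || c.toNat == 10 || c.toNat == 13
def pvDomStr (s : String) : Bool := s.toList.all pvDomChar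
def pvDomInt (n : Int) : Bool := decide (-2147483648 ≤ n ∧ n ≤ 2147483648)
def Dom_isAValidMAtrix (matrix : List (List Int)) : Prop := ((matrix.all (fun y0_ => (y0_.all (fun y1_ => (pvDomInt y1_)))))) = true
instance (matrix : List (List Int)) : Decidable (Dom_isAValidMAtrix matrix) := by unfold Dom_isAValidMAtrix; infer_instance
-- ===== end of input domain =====

-- B replaces A's nested scan with growing-list membership by sort-then-scan: sort the flattened values, range-check only the sorted ends, distinctness by one adjacent strict-inequality pass (alternative algorithm).


-- ===== PORT A =====
-- inner 'for r in l' loop: carries the 'numbers' accumulator; none = an early 'return False'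
def pvAInner (maxN : Int) : List Int → List Int → Option (List Int)
  | [], numbers => some numbers
  | r :: rs, numbers =>
    if r > maxN ∨ r < 0 then none
    else if r ∉ numbers then pvAInner maxN rs (numbers ++ [r])
    else none

-- outer 'for l in matrix' loop
def pvAOuter (maxN : Int) : List (List Int) → List Int → Bool
  | [], _ => true
  | l :: ls, numbers =>
    match pvAInner maxN l numbers with
    | none => false
    | some ns => pvAOuter maxN ls ns

def isAValidMAtrix (matrix : List (List Int)) : Bool :=
  match PySem.List.pyGet? matrix 0 with
  | none => false   -- IndexError in Python (matrix[0] on []); excluded by Pre_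
  | some row0 =>
    let maxN : Int := (matrix.length : Int) * (row0.length : Int)
    pvAOuter maxN matrix []

-- ===== PORT B =====
def isAValidMAtrix_alt (matrix : List (List Int)) : Bool :=
  match PySem.List.pyGet? matrix 0 with
  | none => false   -- IndexError in Python (matrix[0] on []); excluded by Pre_
  | some row0 =>
    let maxN : Int := (matrix.length : Int) * (row0.length : Int)
    let flat := PySem.List.sorted (matrix.flatMap (fun l => l)) (fun x => x) false
    match flat with
    | [] => true                       -- 'flat and …' is falsy; all(…) over empty zip is True
    | m :: t =>
      if m < 0 || t.getLastD m > maxN then false   -- flat[0], flat[-1]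
      else ((m :: t).zip t).all (fun p => decide (p.1 < p.2))  -- zip(flat, flat[1:])

-- ===== PRECONDITION & SPEC =====
-- Pre_ excludes only the empty matrix, on which the Python A raises IndexError (matrix[0]).
def Pre_isAValidMAtrix (matrix : List (List Int)) : Prop := matrix ≠ []
instance (matrix : List (List Int)) : Decidable (Pre_isAValidMAtrix matrix) := by unfold Pre_isAValidMAtrix; infer_instance
def pvWitness_isAValidMAtrix : List (List Int) := [[0, 1], [2, 3]]

def Spec_isAValidMAtrix (matrix : List (List Int)) (out : Bool) : Prop := out = isAValidMAtrix_alt matrix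
instance (matrix : List (List Int)) (out : Bool) : Decidable (Spec_isAValidMAtrix matrix out) := by unfold Spec_isAValidMAtrix; infer_instance

-- ===== CLAIM (what is proved, stated in full; the proofs are below) =====
def Claim_equal_isAValidMAtrix : Prop := ∀ (matrix : List (List Int)), Dom_isAValidMAtrix matrix → Pre_isAValidMAtrix matrix → Spec_isAValidMAtrix matrix (isAValidMAtrix matrix)

-- ===== LEMMAS AND PROOFS =====

-- the inner loop returns 'some' exactly when every element is in range, fresh, and the row has no duplicates
theorem pvAInner_eq (maxN : Int) (l numbers : List Int) :
    pvAInner maxN l numbers =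
      if (∀ r ∈ l, r ≤ maxN ∧ 0 ≤ r ∧ r ∉ numbers) ∧ l.Nodup then some (numbers ++ l) else none := by
  induction l generalizing numbers with
  | nil => simp [pvAInner]
  | cons r rs ih =>
    simp only [pvAInner, ih]
    by_cases h1 : r > maxN ∨ r < 0
    · rw [if_pos h1, if_neg]
      rintro ⟨hall, -⟩
      rcases hall r (by simp) with ⟨h2, h3, -⟩
      omega
    · rw [if_neg h1]
      by_cases h2 : r ∈ numbers
      · simp only [h2, not_true_eq_false, if_false]
        rw [if_neg]
        rintro ⟨hall, -⟩
        exact (hall r (by simp)).2.2 h2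
      · simp only [h2, not_false_eq_true, if_true]
        split_ifs with hc hd hd
        · simp
        · exfalso; apply hd
          obtain ⟨hall, hnd⟩ := hc
          refine ⟨fun x hx => ?_, ?_⟩
          · rcases List.mem_cons.mp hx with rfl | hx
            · exact ⟨by omega, by omega, h2⟩
            · rcases hall x hx with ⟨ha, hb, hcn⟩
              simp only [List.mem_append, List.mem_singleton, not_or] at hcn
              exact ⟨ha, hb, hcn.1⟩
          · rw [List.nodup_cons]
            refine ⟨fun hx => ?_, hnd⟩
            exact (hall r hx).2.2 (by simp)
        · exfalso; apply hc
          obtain ⟨hall, hnd⟩ := hd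
          rw [List.nodup_cons] at hnd
          refine ⟨fun x hx => ?_, hnd.2⟩
          rcases hall x (List.mem_cons_of_mem r hx) with ⟨ha, hb, hcn⟩
          refine ⟨ha, hb, ?_⟩
          simp only [List.mem_append, List.mem_singleton, not_or]
          exact ⟨hcn, fun h => hnd.1 (h ▸ hx)⟩
        · rfl

-- the outer loop over the whole matrix, in terms of the flattened list
theorem pvAOuter_eq (maxN : Int) (rows : List (List Int)) (numbers : List Int) :
    pvAOuter maxN rows numbers =
      decide ((∀ r ∈ rows.flatMap (fun l => l), r ≤ maxN ∧ 0 ≤ r ∧ r ∉ numbers) ∧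
              (rows.flatMap (fun l => l)).Nodup) := by
  induction rows generalizing numbers with
  | nil => simp [pvAOuter]
  | cons l ls ih =>
    simp only [pvAOuter, pvAInner_eq, List.flatMap_cons]
    split_ifs with hc
    · simp only [ih]
      obtain ⟨hall, hnd⟩ := hc
      rw [decide_eq_decide]
      constructor
      · rintro ⟨h1, h2⟩
        refine ⟨?_, List.nodup_append.mpr ⟨hnd, h2, fun a ha b hb heq => ?_⟩⟩
        · intro x hx
          rcases List.mem_append.mp hx with hx | hx
          · exact hall x hx
          · rcases h1 x hx with ⟨ha', hb', hcn⟩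
            exact ⟨ha', hb', fun hmem => hcn (List.mem_append.mpr (Or.inl hmem))⟩
        · exact (h1 b hb).2.2 (List.mem_append.mpr (Or.inr (heq ▸ ha)))
      · rintro ⟨h1, h2⟩
        rcases List.nodup_append.mp h2 with ⟨-, hF, hdisj⟩
        refine ⟨fun x hx => ?_, hF⟩
        rcases h1 x (List.mem_append.mpr (Or.inr hx)) with ⟨ha', hb', hcn⟩
        refine ⟨ha', hb', fun hmem => ?_⟩
        rcases List.mem_append.mp hmem with hm | hm
        · exact hcn hm
        · exact hdisj x hm x hx rfl
    · symm
      simp only [decide_eq_false_iff_not]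
      rintro ⟨hall, hnd⟩
      apply hc
      exact ⟨fun x hx => hall x (List.mem_append.mpr (Or.inl hx)), (List.nodup_append.mp hnd).1⟩

-- in a ≤-sorted list the last element bounds every element
theorem le_getLastD_of_pairwise (a : Int) (t : List Int) (h : (a :: t).Pairwise (· ≤ ·)) :
    ∀ x ∈ a :: t, x ≤ t.getLastD a := by
  induction t generalizing a with
  | nil => intro x hx; simp at hx; simp [hx]
  | cons b t ih =>
    intro x hx
    have hab : a ≤ b := (List.pairwise_cons.mp h).1 b (by simp)
    have htail := (List.pairwise_cons.mp h).2
    have hlast := ih b htail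
    simp only [List.getLastD_cons]
    rcases List.mem_cons.mp hx with rfl | hx
    · exact le_trans hab (hlast b (by simp))
    · exact hlast x hx

-- on a ≤-sorted list, the adjacent strict-inequality scan decides Nodup
theorem adj_all_eq_nodup (s : List Int) (h : s.Pairwise (· ≤ ·)) :
    ((s.zip s.tail).all (fun p => decide (p.1 < p.2))) = decide s.Nodup := by
  induction s with
  | nil => simp
  | cons a s ih =>
    cases s with
    | nil => simp
    | cons b t =>
      have htail := (List.pairwise_cons.mp h).2
      have hab : a ≤ b := (List.pairwise_cons.mp h).1 b (by simp)
      have hrest := ih htail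
      simp only [List.tail_cons] at hrest ⊢
      simp only [List.zip_cons_cons, List.all_cons, hrest]
      by_cases hlt : a < b
      · simp only [hlt, decide_true, Bool.true_and, decide_eq_decide]
        constructor
        · intro hnd
          rw [List.nodup_cons]
          refine ⟨fun hmem => ?_, hnd⟩
          rcases List.mem_cons.mp hmem with rfl | hmem
          · omega
          · have hb2 : b ≤ a := (List.pairwise_cons.mp htail).1 a hmem
            omega
        · intro hnd; exact (List.nodup_cons.mp hnd).2
      · have hab' : a = b := by omega
        simp only [hlt, decide_false, Bool.false_and]
        symm
        simp only [decide_eq_false_iff_not]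
        intro hnd
        exact (List.nodup_cons.mp hnd).1 (hab' ▸ List.mem_cons_self)

-- ===== VERDICT (by name: the statement is the Claim_ definition above) =====
theorem isAValidMAtrix_spec : Claim_equal_isAValidMAtrix := by
  intro matrix _ hpre
  unfold Spec_isAValidMAtrix isAValidMAtrix isAValidMAtrix_alt
  obtain ⟨row0, rows, rfl⟩ : ∃ r rs, matrix = r :: rs := by
    cases matrix with
    | nil => exact absurd rfl hpre
    | cons r rs => exact ⟨r, rs, rfl⟩
  have hg : PySem.List.pyGet? (row0 :: rows) (0:Int) = some row0 := by simp [pysem]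
  simp only [hg]
  rw [pvAOuter_eq]
  set maxN : Int := (((row0 :: rows).length : Int) * (row0.length : Int)) with hm
  set flat0 := (row0 :: rows).flatMap (fun l => l) with hf
  have hperm : (PySem.List.sorted flat0 (fun x => x) false).Perm flat0 :=
    PySem.List.sorted_perm flat0 (fun x => x) false
  have hpw : (PySem.List.sorted flat0 (fun x => x) false).Pairwise (fun a b => a ≤ b) := by
    simpa using PySem.List.sorted_pairwise flat0 (fun x => x)
  cases hs : PySem.List.sorted flat0 (fun x => x) false with
  | nil =>
    have h0 : flat0 = [] := by
      have := hperm; rw [hs] at this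
      exact (List.Perm.nil_eq this).symm
    simp [h0]
  | cons m t =>
    rw [hs] at hperm hpw
    have hmem : ∀ x, x ∈ flat0 ↔ x ∈ m :: t := fun x => (hperm.mem_iff).symm
    have hnd : flat0.Nodup ↔ (m :: t).Nodup := (hperm.nodup_iff).symm
    have hmin : ∀ x ∈ m :: t, m ≤ x := by
      intro x hx
      rcases List.mem_cons.mp hx with rfl | hx
      · exact le_refl x
      · exact (List.pairwise_cons.mp hpw).1 x hx
    have hmax := le_getLastD_of_pairwise m t hpw
    have hshow : (match m :: t with
        | [] => true
        | m :: t =>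
          if (decide (m < 0) || decide (t.getLastD m > maxN)) = true then false
          else ((m :: t).zip t).all fun p => decide (p.1 < p.2)) =
        (if (decide (m < 0) || decide (t.getLastD m > maxN)) = true then false
          else ((m :: t).zip t).all fun p => decide (p.1 < p.2)) := rfl
    rw [hshow]
    by_cases hb : m < 0 ∨ t.getLastD m > maxN
    · rw [if_pos (by simpa using hb)]
      simp only [decide_eq_false_iff_not]
      rintro ⟨hall, -⟩
      rcases hb with hb | hb
      · rcases hall m ((hmem m).mpr (by simp)) with ⟨-, h2, -⟩; omega
      · have hmemL : t.getLastD m ∈ m :: t := List.getLastD_mem_cons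
        rcases hall _ ((hmem _).mpr hmemL) with ⟨h1, -, -⟩; omega
    · rw [if_neg (by simpa using hb)]
      have hadj := adj_all_eq_nodup (m :: t) hpw
      simp only [List.tail_cons] at hadj
      rw [hadj, decide_eq_decide]
      push Not at hb
      constructor
      · rintro ⟨-, h2⟩; exact hnd.mp h2
      · intro h
        refine ⟨fun x hx => ?_, hnd.mpr h⟩
        have hx' := (hmem x).mp hx
        have h1 := hmin x hx'
        have h2 := hmax x hx'
        exact ⟨by omega, by omega, by simp⟩
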